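-- pv_equiv track=rewrite | github.com/ednl/adventofcode | 2015/20.py | pres2
-- ===== SOURCE A (Python) =====
-- def pres2(n):
--     p = 0
--     f = (n - 1) // 50 + 1
--     while f <= n:
--         if n % f == 0:
--             p += f
--         f += 1
--     return p * 11
-- ===== SOURCE B (Python) =====
-- def pres2(n):
--     # Enumerate divisor pairs up to sqrt(n) instead of scanning the whole range.
--     if n <= 0:
--         return 0
--     lo = (n - 1) // 50 + 1
--     total = 0
--     f = 1
--     while f * f <= n:
--         if n % f == 0:
--             if f >= lo:
--                 total += f
--             g = n // f
--             if g != f and g >= lo: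
--                 total += g
--         f += 1
--     return total * 11
-- ===== Notes on version B (the rewrite author's own statement) =====
-- stated objective: faster
-- what changed: B enumerates divisors in factor pairs (f, n//f) for f up to sqrt(n) and keeps those >= (n-1)//50+1, instead of A's linear scan of every candidate from (n-1)//50+1 up to n.
import Mathlib
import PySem

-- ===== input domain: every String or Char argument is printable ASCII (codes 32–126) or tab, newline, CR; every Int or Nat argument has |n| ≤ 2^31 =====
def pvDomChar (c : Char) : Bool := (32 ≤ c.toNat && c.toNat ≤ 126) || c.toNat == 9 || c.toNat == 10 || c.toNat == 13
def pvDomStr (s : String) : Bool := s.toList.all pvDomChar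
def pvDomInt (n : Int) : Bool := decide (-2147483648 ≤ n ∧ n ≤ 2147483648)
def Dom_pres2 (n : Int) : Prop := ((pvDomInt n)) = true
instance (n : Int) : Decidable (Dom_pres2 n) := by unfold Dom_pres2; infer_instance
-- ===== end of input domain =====

-- B replaces A's linear scan from (n-1)//50+1 to n by the O(√n) divisor-pair enumeration; same return value wherever A returns (Pre_ excludes only n = 0, where A raises).

-- ===== PORT A =====
-- while f <= n: if n % f == 0: p += f; f += 1   (fuel = number of remaining iterations)
def pres2Loop (n : Int) (f : Int) (p : Int) : Nat → Int
  | 0 => p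
  | fuel + 1 =>
    if f ≤ n then
      pres2Loop n (f + 1) (if PySem.Int.mod n f = 0 then p + f else p) fuel
    else p

def pres2 (n : Int) : Int :=
  let f := PySem.Int.floordiv (n - 1) 50 + 1
  (pres2Loop n f 0 (n + 1 - f).toNat) * 11

-- ===== PORT B =====
-- while f * f <= n: if n % f == 0: add f and its cofactor n // f when >= lo; f += 1
def pres2AltLoop (n : Int) (lo : Int) (f : Int) (total : Int) : Nat → Int
  | 0 => total
  | fuel + 1 =>
    if f * f ≤ n then
      pres2AltLoop n lo (f + 1)
        (if PySem.Int.mod n f = 0 then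
           (if PySem.Int.floordiv n f ≠ f ∧ lo ≤ PySem.Int.floordiv n f then
              (if lo ≤ f then total + f else total) + PySem.Int.floordiv n f
            else (if lo ≤ f then total + f else total))
         else total) fuel
    else total

def pres2_alt (n : Int) : Int :=
  if n ≤ 0 then 0
  else
    let lo := PySem.Int.floordiv (n - 1) 50 + 1
    (pres2AltLoop n lo 1 0 n.toNat) * 11

-- ===== PRECONDITION & SPEC =====
-- A raises ZeroDivisionError only at n = 0 (the loop evaluates 0 % 0); every other integer is admitted.
def Pre_pres2 (n : Int) : Prop := n ≠ 0
instance (n : Int) : Decidable (Pre_pres2 n) := by unfold Pre_pres2; infer_instance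
def pvWitness_pres2 : Int := (120)

def Spec_pres2 (n : Int) (out : Int) : Prop := out = pres2_alt n
instance (n : Int) (out : Int) : Decidable (Spec_pres2 n out) := by unfold Spec_pres2; infer_instance

-- ===== CLAIM (what is proved, stated in full; the proofs are below) =====
def Claim_equal_pres2 : Prop := ∀ (n : Int), Dom_pres2 n → Pre_pres2 n → Spec_pres2 n (pres2 n)

-- ===== LEMMAS AND PROOFS =====

-- weight of a divisor d of n: counted iff d ≥ lo
def pvW (lo d : Int) : Int := if lo ≤ d then d else 0

-- A's loop is the identity once f has passed n
theorem pres2Loop_stop (n f p : Int) (h : ¬ f ≤ n) : ∀ fuel, pres2Loop n f p fuel = p := by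
  intro fuel
  cases fuel with
  | zero => rfl
  | succ k => rw [pres2Loop, if_neg h]

-- A's loop sums pvW over all divisors in [f, n]
theorem pres2Loop_sum (n : Int) : ∀ (fuel : Nat) (f p : Int), n + 1 - f ≤ (fuel : Int) →
    pres2Loop n f p fuel = p + ∑ d ∈ (Finset.Icc f n).filter (· ∣ n), d := by
  intro fuel
  induction fuel with
  | zero =>
    intro f p h
    have : Finset.Icc f n = ∅ := Finset.Icc_eq_empty (by simp at h; omega)
    simp [pres2Loop, this]
  | succ k ih =>
    intro f p h
    by_cases hf : f ≤ n
    · have hicc : Finset.Icc f n = insert f (Finset.Icc (f + 1) n) := by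
        ext x; simp [Finset.mem_Icc, Finset.mem_insert]; omega
      have hnotmem : f ∉ (Finset.Icc (f + 1) n).filter (· ∣ n) := by
        simp [Finset.mem_filter, Finset.mem_Icc]
      have hfilter : (Finset.Icc f n).filter (· ∣ n)
          = if f ∣ n then insert f ((Finset.Icc (f + 1) n).filter (· ∣ n))
            else (Finset.Icc (f + 1) n).filter (· ∣ n) := by
        rw [hicc]
        split_ifs with hd
        · rw [Finset.filter_insert, if_pos hd]
        · rw [Finset.filter_insert, if_neg hd]
      rw [pres2Loop, if_pos hf, ih (f + 1) _ (by push_cast at h; omega)]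
      rw [hfilter]
      by_cases hd : f ∣ n
      · rw [if_pos hd, Finset.sum_insert hnotmem,
          if_pos ((PySem.Int.mod_eq_zero_iff_dvd n f).mpr hd)]
        ring
      · rw [if_neg hd, if_neg (fun hc => hd ((PySem.Int.mod_eq_zero_iff_dvd n f).mp hc))]
    · have : Finset.Icc f n = ∅ := Finset.Icc_eq_empty (by omega)
      simp [pres2Loop, if_neg hf, this]

-- facts about the cofactor n / d of a divisor 1 ≤ d ≤ n of n ≥ 1
theorem pvCofactor (n d : Int) (hn : 1 ≤ n) (hd : d ∣ n) (h1 : 1 ≤ d) :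
    d * (n / d) = n ∧ (n / d) ∣ n ∧ 1 ≤ n / d ∧ n / d ≤ n ∧ n / (n / d) = d := by
  have hd0 : d ≠ 0 := by omega
  have hmul : d * (n / d) = n := by
    rw [mul_comm]; exact Int.ediv_mul_cancel hd
  have hq : (n / d) ∣ n := ⟨d, by rw [mul_comm]; exact hmul.symm⟩
  have hq1 : 1 ≤ n / d := by
    by_contra h
    nlinarith [mul_nonpos_of_nonneg_of_nonpos (by omega : (0:ℤ) ≤ d) (by omega : n / d ≤ 0)]
  have hqle : n / d ≤ n := Int.le_of_dvd (by omega) hq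
  have hback : n / (n / d) = d := by
    have hq0 : n / d ≠ 0 := by omega
    calc n / (n / d) = (d * (n / d)) / (n / d) := by rw [hmul]
      _ = d := Int.mul_ediv_cancel d hq0
  exact ⟨hmul, hq, hq1, hqle, hback⟩

-- f * f ≤ n ↔ f ≤ √n, for 1 ≤ f
theorem pvSqrt_iff (n f : Int) (hn : 1 ≤ n) (hf : 1 ≤ f) :
    f * f ≤ n ↔ f ≤ ((Nat.sqrt n.toNat : Nat) : Int) := by
  have hf' : ((f.toNat : Nat) : Int) = f := Int.toNat_of_nonneg (by omega)
  have hN : ((n.toNat : Nat) : Int) = n := Int.toNat_of_nonneg (by omega)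
  constructor
  · intro h
    have h1 : ((f.toNat * f.toNat : Nat) : Int) ≤ ((n.toNat : Nat) : Int) := by
      push_cast [hf', hN]
      exact h
    have h2 : f.toNat ≤ Nat.sqrt n.toNat := Nat.le_sqrt.mpr (by exact_mod_cast h1)
    calc f = ((f.toNat : Nat) : Int) := hf'.symm
      _ ≤ ((Nat.sqrt n.toNat : Nat) : Int) := by exact_mod_cast h2
  · intro h
    have h2 : f.toNat ≤ Nat.sqrt n.toNat := by
      have : ((f.toNat : Nat) : Int) ≤ ((Nat.sqrt n.toNat : Nat) : Int) := by rw [hf']; exact h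
      exact_mod_cast this
    have h3 : f.toNat * f.toNat ≤ n.toNat := Nat.le_sqrt.mp h2
    have h4 : ((f.toNat * f.toNat : Nat) : Int) ≤ ((n.toNat : Nat) : Int) := by exact_mod_cast h3
    rw [hN] at h4
    calc f * f = ((f.toNat : Nat) : Int) * ((f.toNat : Nat) : Int) := by rw [hf']
      _ ≤ n := by push_cast at h4 ⊢; exact h4

-- B's loop sums the pair contribution over divisors in [f, √n]
theorem pres2AltLoop_sum (n lo : Int) (hn : 1 ≤ n) :
    ∀ (fuel : Nat) (f t : Int), 1 ≤ f → ((Nat.sqrt n.toNat : Nat) : Int) + 1 - f ≤ (fuel : Int) →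
    pres2AltLoop n lo f t fuel
      = t + ∑ d ∈ (Finset.Icc f ((Nat.sqrt n.toNat : Nat) : Int)).filter (· ∣ n),
          (pvW lo d + (if n / d ≠ d ∧ lo ≤ n / d then n / d else 0)) := by
  intro fuel
  induction fuel with
  | zero =>
    intro f t hf h
    have : Finset.Icc f ((Nat.sqrt n.toNat : Nat) : Int) = ∅ :=
      Finset.Icc_eq_empty (by simp at h; omega)
    simp [pres2AltLoop, this]
  | succ k ih =>
    intro f t hf h
    set s : Int := ((Nat.sqrt n.toNat : Nat) : Int) with hs
    by_cases hfs : f ≤ s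
    · have hff : f * f ≤ n := (pvSqrt_iff n f hn hf).mpr hfs
      have hicc : Finset.Icc f s = insert f (Finset.Icc (f + 1) s) := by
        ext x; simp [Finset.mem_Icc, Finset.mem_insert]; omega
      have hnotmem : f ∉ (Finset.Icc (f + 1) s).filter (· ∣ n) := by
        simp [Finset.mem_filter, Finset.mem_Icc]
      have hfilter : (Finset.Icc f s).filter (· ∣ n)
          = if f ∣ n then insert f ((Finset.Icc (f + 1) s).filter (· ∣ n))
            else (Finset.Icc (f + 1) s).filter (· ∣ n) := by
        rw [hicc]
        split_ifs with hd
        · rw [Finset.filter_insert, if_pos hd]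
        · rw [Finset.filter_insert, if_neg hd]
      rw [pres2AltLoop, if_pos hff]
      rw [ih (f + 1) _ (by omega) (by push_cast at h ⊢; omega)]
      rw [hfilter]
      by_cases hd : f ∣ n
      · rw [if_pos hd, Finset.sum_insert hnotmem,
          if_pos ((PySem.Int.mod_eq_zero_iff_dvd n f).mpr hd),
          PySem.Int.floordiv_eq_ediv_of_pos (a := n) (b := f) (by omega)]
        simp only [pvW]
        split_ifs <;> ring
      · rw [if_neg hd, if_neg (fun hc => hd ((PySem.Int.mod_eq_zero_iff_dvd n f).mp hc))]
    · have hff : ¬ f * f ≤ n := fun hc => hfs ((pvSqrt_iff n f hn hf).mp hc)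
      have : Finset.Icc f s = ∅ := Finset.Icc_eq_empty (by omega)
      simp [pres2AltLoop, if_neg hff, this]

-- the core counting identity: scanning [lo, n] equals pair enumeration up to √n
theorem pvCore (n lo : Int) (hn : 1 ≤ n) (hlo1 : 1 ≤ lo) :
    ∑ d ∈ (Finset.Icc lo n).filter (· ∣ n), d
      = ∑ d ∈ (Finset.Icc 1 ((Nat.sqrt n.toNat : Nat) : Int)).filter (· ∣ n),
          (pvW lo d + (if n / d ≠ d ∧ lo ≤ n / d then n / d else 0)) := by
  set s : Int := ((Nat.sqrt n.toNat : Nat) : Int) with hs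
  -- the divisor set of n inside [1, n]
  set Dv : Finset Int := (Finset.Icc 1 n).filter (· ∣ n) with hDv
  have hmemDv : ∀ d, d ∈ Dv ↔ (1 ≤ d ∧ d ≤ n ∧ d ∣ n) := by
    intro d; simp [hDv, Finset.mem_filter, Finset.mem_Icc]; tauto
  -- LHS = ∑ over Dv of pvW
  have hL : ∑ d ∈ (Finset.Icc lo n).filter (· ∣ n), d = ∑ d ∈ Dv, pvW lo d := by
    have hset : (Finset.Icc lo n).filter (· ∣ n) = Dv.filter (fun d => lo ≤ d) := by
      ext x
      simp only [hDv, Finset.mem_filter, Finset.mem_Icc]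
      constructor
      · rintro ⟨⟨h1, h2⟩, h3⟩; exact ⟨⟨⟨by omega, h2⟩, h3⟩, h1⟩
      · rintro ⟨⟨⟨h1, h2⟩, h3⟩, h4⟩; exact ⟨⟨h4, h2⟩, h3⟩
    rw [hset, Finset.sum_filter]
    simp only [pvW]
  rw [hL]
  -- split Dv into small (d² ≤ n) and large (d² > n) divisors
  have hsplit := Finset.sum_filter_add_sum_filter_not Dv (fun d => d * d ≤ n) (pvW lo)
  set Small : Finset Int := Dv.filter (fun d => d * d ≤ n) with hSm
  set Large : Finset Int := Dv.filter (fun d => ¬ d * d ≤ n) with hLg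
  -- the RHS index set is exactly Small
  have hRidx : (Finset.Icc 1 s).filter (· ∣ n) = Small := by
    ext x
    simp only [hSm, Finset.mem_filter, Finset.mem_Icc, hmemDv]
    constructor
    · rintro ⟨⟨h1, h2⟩, h3⟩
      have hxx : x * x ≤ n := (pvSqrt_iff n x hn h1).mpr h2
      exact ⟨⟨h1, Int.le_of_dvd (by omega) h3, h3⟩, hxx⟩
    · rintro ⟨⟨h1, h2, h3⟩, h4⟩
      exact ⟨⟨h1, (pvSqrt_iff n x hn h1).mp h4⟩, h3⟩
  rw [hRidx, Finset.sum_add_distrib]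
  -- second summand over Small = ∑ over Large of pvW, via d ↦ n / d
  have hPair : ∑ d ∈ Small, (if n / d ≠ d ∧ lo ≤ n / d then n / d else 0)
      = ∑ d ∈ Large, pvW lo d := by
    -- restrict to strictly small divisors (d² < n): on d² = n the term vanishes
    have hstep : ∀ d ∈ Small, (if n / d ≠ d ∧ lo ≤ n / d then n / d else 0)
        = if d * d < n then pvW lo (n / d) else 0 := by
      intro d hd
      rw [hSm, Finset.mem_filter, hmemDv] at hd
      obtain ⟨⟨h1, h2, h3⟩, h4⟩ := hd
      obtain ⟨hmul, hqdvd, hq1, hqle, hback⟩ := pvCofactor n d hn h3 h1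
      by_cases hlt : d * d < n
      · have hne : n / d ≠ d := by intro hc; rw [hc] at hmul; omega
        rw [if_pos hlt]
        unfold pvW
        by_cases hge : lo ≤ n / d
        · rw [if_pos ⟨hne, hge⟩, if_pos hge]
        · rw [if_neg (fun hc => hge hc.2), if_neg hge]
      · have heq : d * d = n := by omega
        have : n / d = d := by
          have := hmul; nlinarith
        rw [if_neg hlt, if_neg (by simp [this])]
    rw [Finset.sum_congr rfl hstep, ← Finset.sum_filter]
    -- bijection d ↦ n / d between strictly-small and large divisors
    refine Finset.sum_nbij' (fun d => n / d) (fun e => n / e) ?_ ?_ ?_ ?_ ?_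
    · intro d hd
      simp only [Finset.mem_filter, hSm, hmemDv] at hd
      obtain ⟨⟨⟨h1, h2, h3⟩, _⟩, h5⟩ := hd
      obtain ⟨hmul, hqdvd, hq1, hqle, hback⟩ := pvCofactor n d hn h3 h1
      simp only [hLg, Finset.mem_filter, hmemDv]
      refine ⟨⟨hq1, hqle, hqdvd⟩, ?_⟩
      have hlt : d < n / d := by nlinarith
      intro hc; nlinarith
    · intro e he
      simp only [hLg, Finset.mem_filter, hmemDv] at he
      obtain ⟨⟨h1, h2, h3⟩, h4⟩ := he
      obtain ⟨hmul, hqdvd, hq1, hqle, hback⟩ := pvCofactor n e hn h3 h1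
      simp only [Finset.mem_filter, hSm, hmemDv]
      have hlt : n / e < e := by nlinarith
      refine ⟨⟨⟨hq1, hqle, hqdvd⟩, by nlinarith⟩, by nlinarith⟩
    · intro d hd
      simp only [Finset.mem_filter, hSm, hmemDv] at hd
      obtain ⟨⟨⟨h1, _, h3⟩, _⟩, _⟩ := hd
      exact (pvCofactor n d hn h3 h1).2.2.2.2
    · intro e he
      simp only [hLg, Finset.mem_filter, hmemDv] at he
      obtain ⟨⟨h1, _, h3⟩, _⟩ := he
      exact (pvCofactor n e hn h3 h1).2.2.2.2
    · intro d _; rfl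
  rw [hPair, hsplit]

-- ===== VERDICT (by name: the statement is the Claim_ definition above) =====
theorem pres2_spec : Claim_equal_pres2 := by
  intro n _ hpre
  unfold Spec_pres2
  simp only [pres2, pres2_alt]
  rcases lt_or_ge n 0 with hneg | hpos
  · -- n < 0: A's range is empty, B returns 0 directly
    have hlo : n < PySem.Int.floordiv (n - 1) 50 + 1 := by
      rw [PySem.Int.floordiv_eq_ediv_of_pos (by omega)]; omega
    rw [if_pos (by omega : n ≤ 0), pres2Loop_stop n _ 0 (by omega) _]
    ring
  · -- n ≥ 1 (n = 0 excluded by Pre_)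
    have hn : 1 ≤ n := by
      rcases hpos.lt_or_eq with h | h
      · omega
      · exact absurd h.symm hpre
    have hbnd : 1 ≤ PySem.Int.floordiv (n - 1) 50 + 1 ∧ PySem.Int.floordiv (n - 1) 50 + 1 ≤ n := by
      rw [PySem.Int.floordiv_eq_ediv_of_pos (by omega)]
      constructor <;> omega
    set lo : Int := PySem.Int.floordiv (n - 1) 50 + 1 with hlodef
    rw [if_neg (by omega : ¬ n ≤ 0)]
    rw [pres2Loop_sum n _ lo 0 (by omega)]
    rw [pres2AltLoop_sum n lo hn n.toNat 1 0 (by omega)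
      (by have h := Nat.sqrt_le_self n.toNat; omega)]
    rw [pvCore n lo hn hbnd.1]
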